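-- pv_equiv track=rewrite | github.com/jacopofar/advent2023 | src/advent2023/day09.py | part2
-- ===== SOURCE A (Python) =====
-- def diff(values: list[int]) -> list[int]:
--     return [values[i + 1] - values[i] for i in range(len(values) - 1)]
--
-- def get_pyramid(hist: list[int]) -> list[list[int]]:
--     pyramid = [hist]
--     new_line = diff(hist)
--     # it's not really necessary to calculate all of this
--     # but they are so small that it doesn't matter
--     while any(n != 0 for n in new_line):
--         pyramid.append(new_line)
--         new_line = diff(new_line)
--     return pyramid
--
-- def part2(problem: list[list[int]]) -> int:
--     retval = 0
--     for hist in problem: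
--         pyramid = get_pyramid(hist)
--         extrapolated = [0]
--         for i in range(len(pyramid)):
--             extrapolated.append(pyramid[-i - 1][0] - extrapolated[-1])
--         retval += extrapolated[-1]
--     return retval
-- ===== SOURCE B (Python) =====
-- def _extrapolate(hist):
--     nl = [b - a for a, b in zip(hist, hist[1:])]
--     if any(n != 0 for n in nl):
--         return hist[0] - _extrapolate(nl)
--     return hist[0]
--
-- def part2(problem):
--     return sum(_extrapolate(hist) for hist in problem)
-- ===== Notes on version B (the rewrite author's own statement) =====
-- stated objective: simpler
-- what changed: Replaces the materialised difference pyramid plus bottom-up index loop with a direct recursion extrapolate(hist) = hist[0] - extrapolate(diff(hist)) (base: diff all zero), summed over the histories.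
import Mathlib
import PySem

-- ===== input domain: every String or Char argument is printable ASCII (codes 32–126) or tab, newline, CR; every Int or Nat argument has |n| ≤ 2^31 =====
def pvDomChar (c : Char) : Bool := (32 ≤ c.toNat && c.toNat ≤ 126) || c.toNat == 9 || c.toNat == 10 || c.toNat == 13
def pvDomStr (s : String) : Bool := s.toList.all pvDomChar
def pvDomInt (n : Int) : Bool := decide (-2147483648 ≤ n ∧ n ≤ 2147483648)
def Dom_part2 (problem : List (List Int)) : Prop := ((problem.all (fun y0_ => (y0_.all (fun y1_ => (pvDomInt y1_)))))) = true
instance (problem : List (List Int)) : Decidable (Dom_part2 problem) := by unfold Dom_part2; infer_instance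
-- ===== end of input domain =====

-- B replaces the materialised pyramid + bottom-up index loop by a direct recursion
-- extrapolate(hist) = hist[0] - extrapolate(diff(hist)); equivalence is about return values.

-- ===== PORT A =====
def diffA (values : List Int) : List Int :=
  (PySem.List.pyRange 0 ((values.length : Int) - 1) 1).map
    (fun i => PySem.List.pyGetD values (i + 1) 0 - PySem.List.pyGetD values i 0)

theorem diffA_length (values : List Int) : (diffA values).length = values.length - 1 := by
  simp [diffA, PySem.List.length_pyRange_one]

def getPyramidLoop (pyramid : List (List Int)) (newLine : List Int) : List (List Int) :=
  if newLine.any (fun n => n != 0) then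
    getPyramidLoop (pyramid ++ [newLine]) (diffA newLine)
  else pyramid
termination_by newLine.length
decreasing_by
  rename_i h
  have hne : newLine ≠ [] := by rintro rfl; simp at h
  have := diffA_length newLine
  have : newLine.length ≠ 0 := by simpa [List.length_eq_zero_iff] using hne
  omega

def getPyramid (hist : List Int) : List (List Int) :=
  getPyramidLoop [hist] (diffA hist)

def part2 (problem : List (List Int)) : Int :=
  problem.foldl (fun retval hist =>
    let pyramid := getPyramid hist
    let ex := (PySem.List.pyRange 0 (pyramid.length : Int) 1).foldl
      (fun ex i =>
        ex ++ [PySem.List.pyGetD (PySem.List.pyGetD pyramid (-i - 1) []) 0 0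
               - PySem.List.pyGetD ex (-1) 0]) [0]
    retval + PySem.List.pyGetD ex (-1) 0) 0

-- ===== PORT B =====
def diffB (values : List Int) : List Int :=
  (values.zip values.tail).map (fun p => p.2 - p.1)

theorem diffB_length (values : List Int) : (diffB values).length = values.length - 1 := by
  simp [diffB]

def extrapolate (hist : List Int) : Int :=
  let nl := diffB hist
  if nl.any (fun n => n != 0) then
    PySem.List.pyGetD hist 0 0 - extrapolate nl
  else
    PySem.List.pyGetD hist 0 0
termination_by hist.length
decreasing_by
  rename_i h
  have hne : diffB hist ≠ [] := by intro hnil; simp only [nl, hnil] at h; simp at h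
  have := diffB_length hist
  have : (diffB hist).length ≠ 0 := by simpa [List.length_eq_zero_iff] using hne
  omega

def part2_alt (problem : List (List Int)) : Int :=
  (problem.map extrapolate).sum

-- ===== PRECONDITION & SPEC =====
-- Pre_ excludes problems containing an empty history, on which Python A raises
-- IndexError (pyramid[-1][0]) and Python B raises IndexError (hist[0]).
def Pre_part2 (problem : List (List Int)) : Prop := ∀ hist ∈ problem, hist ≠ []
instance (problem : List (List Int)) : Decidable (Pre_part2 problem) := by unfold Pre_part2; infer_instance
def pvWitness_part2 : List (List Int) := [[1, 2, 3], [10, 7, 4]]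

def Spec_part2 (problem : List (List Int)) (out : Int) : Prop := out = part2_alt problem
instance (problem : List (List Int)) (out : Int) : Decidable (Spec_part2 problem out) := by unfold Spec_part2; infer_instance

-- ===== CLAIM (what is proved, stated in full; the proofs are below) =====
def Claim_equal_part2 : Prop := ∀ (problem : List (List Int)), Dom_part2 problem → Pre_part2 problem → Spec_part2 problem (part2 problem)

-- ===== LEMMAS AND PROOFS =====

theorem pyGetD_append_last (xs : List Int) (y : Int) :
    PySem.List.pyGetD (xs ++ [y]) (-1) 0 = y := by
  simp [PySem.List.pyGetD, PySem.List.pyGet?, PySem.List.pyIdx?]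

-- last element of the extrapolation loop = left fold of (g i - ·) over the index list
theorem exloop_last (is : List Int) (g : Int → Int) (ex : List Int) (hne : ex ≠ []) :
    PySem.List.pyGetD
      (is.foldl (fun ex i => ex ++ [g i - PySem.List.pyGetD ex (-1) 0]) ex) (-1) 0
    = is.foldl (fun e i => g i - e) (PySem.List.pyGetD ex (-1) 0) := by
  induction is generalizing ex with
  | nil => rfl
  | cons i is ih =>
    simp only [List.foldl_cons]
    rw [ih (ex ++ [g i - PySem.List.pyGetD ex (-1) 0]) (by simp), pyGetD_append_last]

theorem diffA_eq_diffB (values : List Int) : diffA values = diffB values := by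
  apply List.ext_getElem
  · simp [diffA, diffB, PySem.List.length_pyRange_one]
  · intro k h1 h2
    simp only [diffA, diffB, List.getElem_map, PySem.List.getElem_pyRange_one]
    have hlen : k + 1 < values.length := by
      simp [diffB] at h2; omega
    rw [List.getElem_zip]
    simp only [zero_add]
    have e1 : ((k:Int) + 1) = ((k+1 : Nat) : Int) := by push_cast; ring
    rw [e1, PySem.List.pyGetD_natCast, PySem.List.pyGetD_natCast]
    simp [List.getElem_tail, List.getD_eq_getElem?_getD, List.getElem?_eq_getElem hlen,
          List.getElem?_eq_getElem (show k < values.length by omega)]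

theorem pyGetD_neg_rev (xs : List (List Int)) (k : Nat) (h : k < xs.length) :
    PySem.List.pyGetD xs (-(k:Int)-1) ([]:List Int) = PySem.List.pyGetD xs.reverse (k:Int) [] := by
  rw [PySem.List.pyGetD_natCast]
  simp only [PySem.List.pyGetD, PySem.List.pyGet?, PySem.List.pyIdx?]
  have h1 : ¬ (0 ≤ -(k:Int)-1) := by omega
  have h2 : -(xs.length:Int) ≤ -(k:Int)-1 := by omega
  simp only [if_neg h1, if_pos h2]
  have h3 : xs.length - (-(-(k:Int) - 1)).toNat = xs.length - 1 - k := by omega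
  rw [h3]
  rw [Option.bind_some, List.getElem?_eq_getElem (show xs.length - 1 - k < xs.length by omega)]
  rw [List.getD_eq_getElem?_getD, List.getElem?_eq_getElem (show k < xs.reverse.length by simpa using h)]
  simp only [Option.getD_some, List.getElem_reverse]

-- the rows A's while loop appends, as a standalone recursion
def rows (nl : List Int) : List (List Int) :=
  if nl.any (fun n => n != 0) then nl :: rows (diffA nl) else []
termination_by nl.length
decreasing_by
  rename_i h
  have hne : nl ≠ [] := by rintro rfl; simp at h
  have := diffA_length nl
  have : nl.length ≠ 0 := by simpa [List.length_eq_zero_iff] using hne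
  omega

theorem getPyramidLoop_eq (acc : List (List Int)) (nl : List Int) :
    getPyramidLoop acc nl = acc ++ rows nl := by
  induction acc, nl using getPyramidLoop.induct with
  | case1 acc nl h ih =>
    rw [getPyramidLoop, if_pos h, ih]
    conv_rhs => rw [rows]
    simp [h]
  | case2 acc nl h =>
    rw [getPyramidLoop, if_neg h, rows, if_neg h]
    simp

theorem rows_extrap (xs : List Int) :
    PySem.List.pyGetD xs 0 0
      - (rows (diffA xs)).foldr (fun r e => PySem.List.pyGetD r 0 0 - e) 0
    = extrapolate xs := by
  induction xs using extrapolate.induct with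
  | case1 xs nl h ih =>
    rw [extrapolate]
    have hnl : nl = diffA xs := (diffA_eq_diffB xs).symm
    rw [hnl] at h ih
    simp only [← diffA_eq_diffB]
    conv_lhs => rw [rows]
    split_ifs
    simp only [List.foldr_cons]
    rw [ih]
  | case2 xs nl h =>
    rw [extrapolate]
    have hnl : nl = diffA xs := (diffA_eq_diffB xs).symm
    rw [hnl] at h
    simp only [← diffA_eq_diffB]
    conv_lhs => rw [rows]
    split_ifs
    simp

theorem inner_eq (hist : List Int) :
    (PySem.List.pyGetD
      ((PySem.List.pyRange 0 ((getPyramid hist).length : Int) 1).foldl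
        (fun ex i =>
          ex ++ [PySem.List.pyGetD (PySem.List.pyGetD (getPyramid hist) (-i - 1) []) 0 0
                 - PySem.List.pyGetD ex (-1) 0]) [0]) (-1) 0)
    = extrapolate hist := by
  set pyramid := getPyramid hist with hpy
  rw [exloop_last _ (fun i => PySem.List.pyGetD (PySem.List.pyGetD pyramid (-i - 1) []) 0 0) [0] (by simp)]
  have h0 : PySem.List.pyGetD ([0] : List Int) (-1) 0 = 0 := by decide
  rw [h0]
  have hcong : (PySem.List.pyRange 0 ((pyramid.length : Int)) 1).foldl
      (fun e i => PySem.List.pyGetD (PySem.List.pyGetD pyramid (-i - 1) []) 0 0 - e) 0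
    = (PySem.List.pyRange 0 ((pyramid.reverse.length : Int)) 1).foldl
      (fun e i => PySem.List.pyGetD (PySem.List.pyGetD pyramid.reverse i []) 0 0 - e) 0 := by
    rw [List.length_reverse]
    apply PySem.List.foldl_congr_mem
    intro e i hi
    rw [PySem.List.mem_pyRange_one] at hi
    obtain ⟨h1, h2⟩ := hi
    have : i = ((i.toNat : Nat) : Int) := by omega
    rw [this, show -((i.toNat : Nat) : Int) - 1 = -((i.toNat : Nat) : Int) - 1 from rfl]
    rw [pyGetD_neg_rev pyramid i.toNat (by omega)]
  rw [hcong,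
      PySem.List.foldl_pyRange_zero_pyGetD' pyramid.reverse ([]:List Int)
        (fun e r => PySem.List.pyGetD r 0 0 - e) 0,
      List.foldl_reverse]
  rw [hpy, getPyramid, getPyramidLoop_eq]
  simp only [List.foldr_append, List.foldr_cons, List.foldr_nil]
  exact rows_extrap hist

theorem foldl_add_sum (F : List Int → Int) (l : List (List Int)) (init : Int) :
    l.foldl (fun r h => r + F h) init = init + (l.map F).sum := by
  induction l generalizing init with
  | nil => simp
  | cons x xs ih => simp [ih]; ring

-- ===== VERDICT (by name: the statement is the Claim_ definition above) =====
theorem part2_spec : Claim_equal_part2 := by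
  intro problem _ _
  unfold Spec_part2 part2 part2_alt
  rw [List.foldl_ext (g := fun r hist => r + extrapolate hist)
        (H := fun r hist _ => congrArg (r + ·) (inner_eq hist)),
      foldl_add_sum extrapolate problem 0, zero_add]
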